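-- pv_equiv track=rewrite | github.com/contactmukundthiru-cyber/Misinformation-Agent-Simulation | sim/cascades/analysis.py | compute_cascade_breadth
-- ===== SOURCE A (Python) =====
-- from collections import defaultdict
-- from typing import Dict, List, Optional, Tuple
--
-- def compute_cascade_breadth(
--     tree: Dict[int, List[int]],
-- ) -> Dict[int, int]:
--     """
--     Compute breadth at each level of cascade.
--
--     Returns dict mapping level -> number of nodes at that level.
--     """
--     breadth: Dict[int, int] = defaultdict(int)
--
--     def bfs():
--         queue = [(-1, 0)]  # (node, level)
--         visited = set()
--
--         while queue:
--             node, level = queue.pop(0)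
--             if node in visited:
--                 continue
--             visited.add(node)
--
--             if node != -1:  # Don't count virtual root
--                 breadth[level] += 1
--
--             for child in tree.get(node, []):
--                 if child not in visited:
--                     queue.append((child, level + 1))
--
--     bfs()
--     return dict(breadth)
-- ===== SOURCE B (Python) =====
-- def compute_cascade_breadth(tree):
--     """
--     Compute breadth at each level of cascade.
--
--     Returns dict mapping level -> number of nodes at that level.
--     """
--     breadth = {}
--     visited = set()
--     frontier = [-1]  # virtual root
--     level = 0
--     while frontier:
--         count = 0
--         next_frontier = []
--         for node in frontier:
--             if node in visited:
--                 continue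
--             visited.add(node)
--             if node != -1:  # don't count virtual root
--                 count += 1
--             for child in tree.get(node, []):
--                 if child not in visited:
--                     next_frontier.append(child)
--         if count > 0:
--             breadth[level] = count
--         frontier = next_frontier
--         level += 1
--     return breadth
-- ===== Notes on version B (the rewrite author's own statement) =====
-- stated objective: alternative
-- what changed: Level-synchronous BFS: a plain frontier list per level with the level as a loop counter and a per-level count written to the dict once, instead of a single FIFO queue of (node, level) pairs popped with list.pop(0) and incremental defaultdict counting.
import Mathlib
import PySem

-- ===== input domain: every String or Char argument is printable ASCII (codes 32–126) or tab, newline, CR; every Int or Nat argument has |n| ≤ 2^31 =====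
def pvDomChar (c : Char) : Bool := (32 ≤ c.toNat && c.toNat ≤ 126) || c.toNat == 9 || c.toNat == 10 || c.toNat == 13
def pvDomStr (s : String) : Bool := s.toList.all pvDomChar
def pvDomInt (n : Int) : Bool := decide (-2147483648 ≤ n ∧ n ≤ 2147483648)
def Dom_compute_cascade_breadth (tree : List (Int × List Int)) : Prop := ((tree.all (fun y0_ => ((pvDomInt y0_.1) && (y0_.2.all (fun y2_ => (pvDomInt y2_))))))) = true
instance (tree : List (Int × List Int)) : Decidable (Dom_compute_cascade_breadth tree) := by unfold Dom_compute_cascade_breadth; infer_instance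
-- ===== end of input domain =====

-- B replaces the FIFO (node, level) queue BFS by a level-synchronous BFS: a frontier list
-- per level, the level as a loop counter, a per-level count written to the dict once.

-- ===== PORT A =====
-- `univA tree` = all node ids that can ever be enqueued (the virtual root -1 and every child
-- occurring in the tree); used only as the termination measure of the BFS loops.
def univA (tree : List (Int × List Int)) : List Int :=
  PySem.Set.ofList ((-1) :: tree.flatMap Prod.snd)

theorem mem_univA_neg1 (tree : List (Int × List Int)) : (-1 : Int) ∈ univA tree := by
  simp [univA, PySem.Set.mem_ofList]

theorem mem_univA_child (tree : List (Int × List Int)) (c : Int)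
    (h : c ∈ tree.flatMap Prod.snd) : c ∈ univA tree := by
  have hm : c ∈ (-1) :: tree.flatMap Prod.snd := List.mem_cons_of_mem _ h
  simpa [univA, PySem.Set.mem_ofList] using hm

theorem mem_getD_flatMap (tree : List (Int × List Int)) (n c : Int)
    (h : c ∈ (PySem.Dict.mk tree).getD n []) : c ∈ tree.flatMap Prod.snd := by
  induction tree with
  | nil => simp [PySem.Dict.getD, PySem.Dict.get?] at h
  | cons p rest ih =>
      rw [PySem.Dict.getD_eq_get?_getD, PySem.Dict.get?_mk_cons] at h
      by_cases hk : p.1 == n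
      · simp [hk] at h
        exact List.mem_flatMap.mpr ⟨p, List.mem_cons_self .., h⟩
      · simp only [hk, Bool.false_eq_true, if_false] at h
        rw [← PySem.Dict.getD_eq_get?_getD] at h
        have := ih h
        simp only [List.flatMap_cons, List.mem_append]
        exact Or.inr this

theorem set_add_of_not_mem (v : PySem.Set Int) (node : Int) (h : node ∉ v) :
    PySem.Set.add v node = v ++ [node] := by
  simp [PySem.Set.add, PySem.Set.contains, h]

-- strict decrease of the unvisited part of the universe
theorem length_filter_out_lt (univ v ex : List Int) (a : Int)
    (ha : a ∈ univ) (hav : a ∉ v) (haex : a ∈ ex) :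
    (univ.filter (fun x => decide (x ∉ v ++ ex))).length
      < (univ.filter (fun x => decide (x ∉ v))).length := by
  have hsub : List.Sublist (univ.filter (fun x => decide (x ∉ v ++ ex)))
      (univ.filter (fun x => decide (x ∉ v))) := by
    apply List.monotone_filter_right
    intro x hx
    simp only [decide_eq_true_eq, List.mem_append] at *
    tauto
  refine lt_of_le_of_ne hsub.length_le ?_
  intro hlen
  have heq := hsub.eq_of_length hlen
  have hmem : a ∈ univ.filter (fun x => decide (x ∉ v)) := by
    simp only [List.mem_filter, decide_eq_true_eq]
    exact ⟨ha, hav⟩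
  rw [← heq] at hmem
  simp only [List.mem_filter, decide_eq_true_eq, List.mem_append] at hmem
  exact hmem.2 (Or.inr haex)

theorem length_filter_out_add_lt (univ v : List Int) (a : Int)
    (ha : a ∈ univ) (hav : a ∉ v) :
    (univ.filter (fun x => decide (x ∉ PySem.Set.add v a))).length
      < (univ.filter (fun x => decide (x ∉ v))).length := by
  have hfg : ∀ x ∈ univ, decide (x ∉ PySem.Set.add v a) = decide (x ∉ v ++ [a]) := by
    intro x _
    apply decide_eq_decide.mpr
    rw [set_add_of_not_mem v a hav]
  rw [List.filter_congr hfg]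
  exact length_filter_out_lt univ v [a] a ha hav (List.mem_singleton.mpr rfl)

-- while queue: pop(0); skip visited; count non-root nodes into breadth[level]; enqueue unvisited children
def aLoop (tree : List (Int × List Int)) (queue : List (Int × Int)) (visited : PySem.Set Int)
    (breadth : PySem.Dict Int Int) (hq : ∀ p ∈ queue, p.1 ∈ univA tree) : PySem.Dict Int Int :=
  match queue with
  | [] => breadth
  | (node, level) :: rest =>
    if hv : node ∈ visited then
      aLoop tree rest visited breadth (fun p hp => hq p (List.mem_cons_of_mem _ hp))
    else
      let visited' := PySem.Set.add visited node
      let breadth' := if node = -1 then breadth else breadth.insert level (breadth.getD level 0 + 1)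
      let kids := ((PySem.Dict.mk tree).getD node []).filter (fun c => decide (c ∉ visited'))
      aLoop tree (rest ++ kids.map (fun c => (c, level + 1))) visited' breadth'
        (by
          intro p hp
          rcases List.mem_append.mp hp with h1 | h2
          · exact hq p (List.mem_cons_of_mem _ h1)
          · rcases List.mem_map.mp h2 with ⟨c, hc, rfl⟩
            exact mem_univA_child tree c (mem_getD_flatMap tree node c (List.mem_of_mem_filter hc)))
  termination_by (((univA tree).filter (fun x => decide (x ∉ visited))).length, queue.length)
  decreasing_by
  · apply Prod.Lex.right
    simp
  · apply Prod.Lex.left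
    exact length_filter_out_add_lt _ visited node
      (hq (node, level) (List.mem_cons_self ..)) hv

def compute_cascade_breadth (tree : List (Int × List Int)) : List (Int × Int) :=
  (aLoop tree [(-1, 0)] PySem.Set.empty PySem.Dict.empty
    (by
      intro p hp
      simp only [List.mem_singleton] at hp
      subst hp
      exact mem_univA_neg1 tree)).items

-- ===== PORT B =====
-- inner for-loop over one frontier: returns (count, next_frontier, visited)
def bInner (tree : List (Int × List Int)) (frontier : List Int) (count : Int)
    (next : List Int) (visited : PySem.Set Int) : Int × List Int × PySem.Set Int :=
  match frontier with
  | [] => (count, next, visited)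
  | node :: fr =>
    if node ∈ visited then bInner tree fr count next visited
    else
      let visited' := PySem.Set.add visited node
      let count' := if node = -1 then count else count + 1
      bInner tree fr count'
        (next ++ ((PySem.Dict.mk tree).getD node []).filter (fun c => decide (c ∉ visited')))
        visited'

-- what one frontier pass does to its accumulators (used for bOuter's termination)
theorem bInner_spec (tree : List (Int × List Int)) :
    ∀ (fr : List Int) (c : Int) (nx : List Int) (v : PySem.Set Int),
      ∃ ex nw,
        (bInner tree fr c nx v).2.2 = v ++ ex ∧
        (bInner tree fr c nx v).2.1 = nx ++ nw ∧
        (∀ a ∈ ex, a ∈ fr ∧ a ∉ v) ∧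
        (∀ a ∈ nw, a ∈ tree.flatMap Prod.snd) ∧
        (ex = [] → bInner tree fr c nx v = (c, nx, v)) := by
  intro fr
  induction fr with
  | nil =>
      intro c nx v
      exact ⟨[], [], by simp [bInner], by simp [bInner], by simp, by simp, fun _ => by simp [bInner]⟩
  | cons node fr ih =>
      intro c nx v
      by_cases hv : node ∈ v
      · obtain ⟨ex, nw, h1, h2, h3, h4, h5⟩ := ih c nx v
        refine ⟨ex, nw, ?_, ?_, ?_, ?_, ?_⟩
        · simpa [bInner, hv] using h1
        · simpa [bInner, hv] using h2
        · exact fun a ha => ⟨List.mem_cons_of_mem _ (h3 a ha).1, (h3 a ha).2⟩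
        · exact h4
        · intro hex
          simpa [bInner, hv] using h5 hex
      · have hadd := set_add_of_not_mem v node hv
        obtain ⟨ex, nw, h1, h2, h3, h4, h5⟩ :=
          ih (if node = -1 then c else c + 1)
            (nx ++ ((PySem.Dict.mk tree).getD node []).filter
              (fun x => decide (x ∉ PySem.Set.add v node)))
            (PySem.Set.add v node)
        have hstep : bInner tree (node :: fr) c nx v =
            bInner tree fr (if node = -1 then c else c + 1)
              (nx ++ ((PySem.Dict.mk tree).getD node []).filter
                (fun x => decide (x ∉ PySem.Set.add v node)))
              (PySem.Set.add v node) := by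
          simp [bInner, hv]
        refine ⟨node :: ex,
          ((PySem.Dict.mk tree).getD node []).filter
            (fun x => decide (x ∉ PySem.Set.add v node)) ++ nw, ?_, ?_, ?_, ?_, ?_⟩
        · rw [hstep, h1, hadd]
          simp
        · rw [hstep, h2]
          simp
        · intro a ha
          rcases List.mem_cons.mp ha with rfl | ha'
          · exact ⟨List.mem_cons_self .., hv⟩
          · refine ⟨List.mem_cons_of_mem _ (h3 a ha').1, fun hav => (h3 a ha').2 ?_⟩
            rw [hadd]
            exact List.mem_append_left _ hav
        · intro a ha
          rcases List.mem_append.mp ha with hk | hn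
          · exact mem_getD_flatMap tree node a (List.mem_of_mem_filter hk)
          · exact h4 a hn
        · intro hex
          exact absurd hex (List.cons_ne_nil _ _)

-- while frontier: one bInner pass per level, breadth[level] = count if count > 0
def bOuter (tree : List (Int × List Int)) (frontier : List Int) (level : Int)
    (visited : PySem.Set Int) (breadth : PySem.Dict Int Int)
    (hf : ∀ n ∈ frontier, n ∈ univA tree) : PySem.Dict Int Int :=
  match frontier with
  | [] => breadth
  | _ :: _ =>
    let t := bInner tree frontier 0 [] visited
    bOuter tree t.2.1 (level + 1) t.2.2
      (if t.1 > 0 then breadth.insert level t.1 else breadth)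
      (by
        intro n hn
        obtain ⟨ex, nw, h1, h2, h3, h4, h5⟩ := bInner_spec tree frontier 0 [] visited
        rw [h2] at hn
        simp only [List.nil_append] at hn
        exact mem_univA_child tree n (h4 n hn))
  termination_by (((univA tree).filter (fun x => decide (x ∉ visited))).length, frontier.length)
  decreasing_by
    have hf' : ∀ n ∈ frontier, n ∈ univA tree := by assumption
    obtain ⟨ex, nw, h1, h2, h3, h4, h5⟩ := bInner_spec tree frontier 0 [] visited
    by_cases hex : ex = []
    · simp only [h5 hex]
      apply Prod.Lex.right
      simp
    · obtain ⟨a, ha⟩ := List.exists_mem_of_ne_nil ex hex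
      apply Prod.Lex.left
      have hfg : ∀ x ∈ univA tree,
          decide (x ∉ (bInner tree frontier 0 [] visited).2.2)
            = decide (x ∉ visited ++ ex) := by
        intro x _
        apply decide_eq_decide.mpr
        rw [h1]
      rw [List.filter_congr hfg]
      exact length_filter_out_lt _ visited ex a (hf' a (h3 a ha).1) (h3 a ha).2 ha

def compute_cascade_breadth_alt (tree : List (Int × List Int)) : List (Int × Int) :=
  (bOuter tree [-1] 0 PySem.Set.empty PySem.Dict.empty
    (by
      intro n hn
      simp only [List.mem_singleton] at hn
      subst hn
      exact mem_univA_neg1 tree)).items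

-- ===== PRECONDITION & SPEC =====
def Spec_compute_cascade_breadth (tree : List (Int × List Int)) (out : List (Int × Int)) : Prop := out = compute_cascade_breadth_alt tree
instance (tree : List (Int × List Int)) (out : List (Int × Int)) : Decidable (Spec_compute_cascade_breadth tree out) := by unfold Spec_compute_cascade_breadth; infer_instance

-- ===== CLAIM (what is proved, stated in full; the proofs are below) =====
def Claim_equal_compute_cascade_breadth : Prop := ∀ (tree : List (Int × List Int)), Dom_compute_cascade_breadth tree → Spec_compute_cascade_breadth tree (compute_cascade_breadth tree)

-- ===== LEMMAS AND PROOFS =====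

theorem aLoop_nil (tree : List (Int × List Int)) (v : PySem.Set Int) (b : PySem.Dict Int Int)
    (h : ∀ p ∈ ([] : List (Int × Int)), p.1 ∈ univA tree) : aLoop tree [] v b h = b := by
  rw [aLoop]

theorem bOuter_nil (tree : List (Int × List Int)) (level : Int) (v : PySem.Set Int) (b : PySem.Dict Int Int)
    (h : ∀ n ∈ ([] : List Int), n ∈ univA tree) : bOuter tree [] level v b h = b := by
  rw [bOuter]

theorem aLoop_cons_skip (tree : List (Int × List Int)) (node level : Int) (rest : List (Int × Int))
    (v : PySem.Set Int) (b : PySem.Dict Int Int) (h : ∀ p ∈ (node, level) :: rest, p.1 ∈ univA tree)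
    (h2 : ∀ p ∈ rest, p.1 ∈ univA tree) (hv : node ∈ v) :
    aLoop tree ((node, level) :: rest) v b h = aLoop tree rest v b h2 := by
  rw [aLoop]
  simp only [hv, dif_pos]
theorem aLoop_cons_new (tree : List (Int × List Int)) (node level : Int) (rest : List (Int × Int))
    (v : PySem.Set Int) (b : PySem.Dict Int Int) (h : ∀ p ∈ (node, level) :: rest, p.1 ∈ univA tree)
    (h2 : ∀ p ∈ rest ++ (((PySem.Dict.mk tree).getD node []).filter
        (fun x => decide (x ∉ PySem.Set.add v node))).map (fun x => (x, level + 1)), p.1 ∈ univA tree)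
    (hv : node ∉ v) :
    aLoop tree ((node, level) :: rest) v b h
      = aLoop tree (rest ++ (((PySem.Dict.mk tree).getD node []).filter
            (fun x => decide (x ∉ PySem.Set.add v node))).map (fun x => (x, level + 1)))
          (PySem.Set.add v node)
          (if node = -1 then b else b.insert level (b.getD level 0 + 1)) h2 := by
  rw [aLoop]
  simp only [hv, dif_neg, not_false_iff]

theorem bOuter_cons (tree : List (Int × List Int)) (n0 : Int) (fr0 : List Int) (level : Int)
    (v : PySem.Set Int) (b : PySem.Dict Int Int) (h : ∀ n ∈ n0 :: fr0, n ∈ univA tree)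
    (h2 : ∀ n ∈ (bInner tree (n0 :: fr0) 0 [] v).2.1, n ∈ univA tree) :
    bOuter tree (n0 :: fr0) level v b h
      = bOuter tree (bInner tree (n0 :: fr0) 0 [] v).2.1 (level + 1)
          (bInner tree (n0 :: fr0) 0 [] v).2.2
          (if (bInner tree (n0 :: fr0) 0 [] v).1 > 0
            then b.insert level ((bInner tree (n0 :: fr0) 0 [] v).1) else b) h2 := by
  rw [bOuter]

theorem aLoop_congr (tree : List (Int × List Int)) {q1 q2 : List (Int × Int)} (hq : q1 = q2)
    {b1 b2 : PySem.Dict Int Int} (hb : b1 = b2) (v : PySem.Set Int)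
    (h1 : ∀ p ∈ q1, p.1 ∈ univA tree) (h2 : ∀ p ∈ q2, p.1 ∈ univA tree) :
    aLoop tree q1 v b1 h1 = aLoop tree q2 v b2 h2 := by
  subst hq; subst hb; rfl

theorem bOuter_congr (tree : List (Int × List Int)) {f1 f2 : List Int} (hf : f1 = f2)
    {v1 v2 : PySem.Set Int} (hv : v1 = v2) {b1 b2 : PySem.Dict Int Int} (hb : b1 = b2) (level : Int)
    (h1 : ∀ n ∈ f1, n ∈ univA tree) (h2 : ∀ n ∈ f2, n ∈ univA tree) :
    bOuter tree f1 level v1 b1 h1 = bOuter tree f2 level v2 b2 h2 := by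
  subst hf; subst hv; subst hb; rfl
theorem breadth_step (db : PySem.Dict Int Int) (l c : Int)
    (hdb : ∀ k ∈ db.keys, k < l) (hc : 0 ≤ c) :
    (if c > 0 then db.insert l c else db).insert l
        ((if c > 0 then db.insert l c else db).getD l 0 + 1)
      = db.insert l (c + 1) := by
  by_cases h : c > 0
  · rw [if_pos h, PySem.Dict.getD_insert_self, PySem.Dict.insert_insert_self]
  · have hc0 : c = 0 := le_antisymm (not_lt.mp h) hc
    subst hc0
    rw [if_neg h]
    have hnc : db.contains l = false := by
      by_contra hcon
      have hmem : l ∈ db.keys := (PySem.Dict.contains_iff_mem_keys db l).mp (by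
        cases hb : db.contains l
        · exact absurd hb hcon
        · rfl)
      exact absurd (hdb l hmem) (lt_irrefl l)
    rw [PySem.Dict.getD_of_not_contains db 0 hnc]

theorem sim (tree : List (Int × List Int)) (v : PySem.Set Int) (fr nx : List Int) (c : Int)
    (db : PySem.Dict Int Int) (l : Int)
    (hfr : ∀ n ∈ fr, n ∈ univA tree) (hnx : ∀ n ∈ nx, n ∈ univA tree)
    (hdb : ∀ k ∈ db.keys, k < l) (hc : 0 ≤ c)
    (hq : ∀ p ∈ fr.map (fun n => (n, l)) ++ nx.map (fun n => (n, l + 1)), p.1 ∈ univA tree)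
    (h' : ∀ n ∈ (bInner tree fr c nx v).2.1, n ∈ univA tree) :
    aLoop tree (fr.map (fun n => (n, l)) ++ nx.map (fun n => (n, l + 1))) v
        (if c > 0 then db.insert l c else db) hq
      = bOuter tree (bInner tree fr c nx v).2.1 (l + 1) (bInner tree fr c nx v).2.2
          (if (bInner tree fr c nx v).1 > 0 then db.insert l ((bInner tree fr c nx v).1) else db)
          h' := by
  cases fr with
  | nil =>
      cases nx with
      | nil =>
          show aLoop tree [] v (if c > 0 then db.insert l c else db) (by simp)
            = bOuter tree [] (l + 1) v (if c > 0 then db.insert l c else db) (by simp)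
          rw [aLoop_nil, bOuter_nil]
      | cons m nx' =>
          have hBc : ∀ k ∈ (if c > 0 then db.insert l c else db).keys, k < l + 1 := by
            intro k hk
            by_cases h : c > 0
            · rw [if_pos h] at hk
              rcases (PySem.Dict.mem_keys_insert db l k c).mp hk with rfl | hk'
              · omega
              · exact lt_trans (hdb k hk') (by omega)
            · rw [if_neg h] at hk
              exact lt_trans (hdb k hk) (by omega)
          have hU : ∀ n ∈ (bInner tree (m :: nx') 0 [] v).2.1, n ∈ univA tree := by
            obtain ⟨ex, nw, h1, h2, h3, h4, h5⟩ := bInner_spec tree (m :: nx') 0 [] v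
            intro n hn
            rw [h2, List.nil_append] at hn
            exact mem_univA_child tree n (h4 n hn)
          have hq2 : ∀ p ∈ (m :: nx').map (fun n => (n, l + 1))
              ++ ([] : List Int).map (fun n => (n, l + 1 + 1)), p.1 ∈ univA tree := by
            intro p hp
            simp only [List.map_nil, List.append_nil] at hp
            exact hq p hp
          have H := sim tree v (m :: nx') [] 0 (if c > 0 then db.insert l c else db) (l + 1)
            hnx (by simp) hBc le_rfl hq2 hU
          refine Eq.trans ?_ (H.trans ?_)
          · exact aLoop_congr tree (List.append_nil _).symm (if_neg (by norm_num)).symm v hq hq2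
          · exact (bOuter_cons tree m nx' (l + 1) v (if c > 0 then db.insert l c else db) h' hU).symm
  | cons node fr' =>
      by_cases hv : node ∈ v
      · have hstep : bInner tree (node :: fr') c nx v = bInner tree fr' c nx v := by
          simp [bInner, hv]
        have hfr' : ∀ n ∈ fr', n ∈ univA tree := fun n hn => hfr n (List.mem_cons_of_mem _ hn)
        have hU' : ∀ n ∈ (bInner tree fr' c nx v).2.1, n ∈ univA tree := by
          rw [← hstep]
          exact h'
        have hq2 : ∀ p ∈ fr'.map (fun n => (n, l)) ++ nx.map (fun n => (n, l + 1)),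
            p.1 ∈ univA tree := fun p hp => hq p (List.mem_cons_of_mem _ hp)
        have H := sim tree v fr' nx c db l hfr' hnx hdb hc hq2 hU'
        refine Eq.trans ?_ (H.trans ?_)
        · exact aLoop_cons_skip tree node l (fr'.map (fun n => (n, l)) ++ nx.map (fun n => (n, l + 1)))
            v (if c > 0 then db.insert l c else db) hq hq2 hv
        · exact bOuter_congr tree (by rw [hstep]) (by rw [hstep]) (by rw [hstep]) (l + 1) hU' h'
      · have hstep : bInner tree (node :: fr') c nx v
            = bInner tree fr' (if node = -1 then c else c + 1)
                (nx ++ ((PySem.Dict.mk tree).getD node []).filter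
                  (fun x => decide (x ∉ PySem.Set.add v node)))
                (PySem.Set.add v node) := by
          simp [bInner, hv]
        have hfr' : ∀ n ∈ fr', n ∈ univA tree := fun n hn => hfr n (List.mem_cons_of_mem _ hn)
        have hknx : ∀ n ∈ nx ++ ((PySem.Dict.mk tree).getD node []).filter
            (fun x => decide (x ∉ PySem.Set.add v node)), n ∈ univA tree := by
          intro n hn
          rcases List.mem_append.mp hn with h1 | h2
          · exact hnx n h1
          · exact mem_univA_child tree n (mem_getD_flatMap tree node n (List.mem_of_mem_filter h2))
        have hc' : 0 ≤ (if node = -1 then c else c + 1) := by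
          split <;> omega
        have hU' : ∀ n ∈ (bInner tree fr' (if node = -1 then c else c + 1)
            (nx ++ ((PySem.Dict.mk tree).getD node []).filter
              (fun x => decide (x ∉ PySem.Set.add v node)))
            (PySem.Set.add v node)).2.1, n ∈ univA tree := by
          rw [← hstep]
          exact h'
        have hq2 : ∀ p ∈ fr'.map (fun n => (n, l))
            ++ (nx ++ ((PySem.Dict.mk tree).getD node []).filter
              (fun x => decide (x ∉ PySem.Set.add v node))).map (fun n => (n, l + 1)),
            p.1 ∈ univA tree := by
          intro p hp
          rcases List.mem_append.mp hp with h1 | h2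
          · rcases List.mem_map.mp h1 with ⟨n, hn, rfl⟩
            exact hfr' n hn
          · rcases List.mem_map.mp h2 with ⟨n, hn, rfl⟩
            exact hknx n hn
        have hmid : ∀ p ∈ (fr'.map (fun n => (n, l)) ++ nx.map (fun n => (n, l + 1)))
            ++ (((PySem.Dict.mk tree).getD node []).filter
              (fun x => decide (x ∉ PySem.Set.add v node))).map (fun x => (x, l + 1)),
            p.1 ∈ univA tree := by
          intro p hp
          rcases List.mem_append.mp hp with h1 | h2
          · exact hq2 p (List.mem_append.mpr (by
              rcases List.mem_append.mp h1 with ha | hb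
              · exact Or.inl ha
              · rcases List.mem_map.mp hb with ⟨n, hn, rfl⟩
                exact Or.inr (List.mem_map.mpr ⟨n, List.mem_append_left _ hn, rfl⟩)))
          · rcases List.mem_map.mp h2 with ⟨n, hn, rfl⟩
            exact hknx n (List.mem_append_right _ hn)
        have H := sim tree (PySem.Set.add v node) fr'
          (nx ++ ((PySem.Dict.mk tree).getD node []).filter
            (fun x => decide (x ∉ PySem.Set.add v node)))
          (if node = -1 then c else c + 1) db l hfr' hknx hdb hc' hq2 hU'
        refine Eq.trans ?_ (H.trans ?_)
        · refine Eq.trans (aLoop_cons_new tree node l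
            (fr'.map (fun n => (n, l)) ++ nx.map (fun n => (n, l + 1))) v
            (if c > 0 then db.insert l c else db) hq hmid hv) ?_
          refine aLoop_congr tree ?_ ?_ _ hmid hq2
          · simp [List.map_append, List.append_assoc]
          · by_cases hnode : node = -1
            · simp [hnode]
            · rw [if_neg hnode, if_neg hnode, if_pos (by omega : (c + 1 : Int) > 0)]
              exact breadth_step db l c hdb hc
        · exact bOuter_congr tree (by rw [hstep]) (by rw [hstep]) (by rw [hstep]) (l + 1) hU' h'
  termination_by (((univA tree).filter (fun x => decide (x ∉ v))).length, fr.length + nx.length, nx.length)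
  decreasing_by
  · subst_vars
    apply Prod.Lex.right
    simp only [List.length_cons, List.length_nil, Nat.add_zero, Nat.zero_add]
    exact Prod.Lex.right _ (by omega)
  · subst_vars
    apply Prod.Lex.right
    apply Prod.Lex.left
    simp
  · subst_vars
    apply Prod.Lex.left
    exact length_filter_out_add_lt _ v node (hfr node (List.mem_cons_self ..)) hv
theorem ports_agree (tree : List (Int × List Int)) :
    compute_cascade_breadth tree = compute_cascade_breadth_alt tree := by
  unfold compute_cascade_breadth compute_cascade_breadth_alt
  refine congrArg PySem.Dict.items ?_
  have hfr : ∀ n ∈ [(-1 : Int)], n ∈ univA tree := by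
    intro n hn
    simp only [List.mem_singleton] at hn
    subst hn
    exact mem_univA_neg1 tree
  have hU : ∀ n ∈ (bInner tree [-1] 0 [] PySem.Set.empty).2.1, n ∈ univA tree := by
    obtain ⟨ex, nw, h1, h2, h3, h4, h5⟩ := bInner_spec tree [-1] 0 [] PySem.Set.empty
    intro n hn
    rw [h2, List.nil_append] at hn
    exact mem_univA_child tree n (h4 n hn)
  have hq0 : ∀ p ∈ ([(-1 : Int)].map (fun n => (n, (0 : Int)))
      ++ ([] : List Int).map (fun n => (n, (0 : Int) + 1))), p.1 ∈ univA tree := by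
    intro p hp
    simp only [List.map_nil, List.append_nil, List.map_cons, List.map_nil, List.mem_singleton] at hp
    subst hp
    exact mem_univA_neg1 tree
  have hdb0 : ∀ k ∈ (PySem.Dict.empty : PySem.Dict Int Int).keys, k < (0 : Int) := by
    intro k hk
    simp [PySem.Dict.keys_empty] at hk
  have H := sim tree PySem.Set.empty [-1] [] 0 PySem.Dict.empty 0 hfr (by simp) hdb0 le_rfl hq0 hU
  refine Eq.trans ?_ (H.trans ?_)
  · exact aLoop_congr tree rfl (if_neg (by norm_num)).symm _ _ hq0
  · exact (bOuter_cons tree (-1) [] 0 PySem.Set.empty PySem.Dict.empty _ hU).symm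

-- ===== VERDICT (by name: the statement is the Claim_ definition above) =====
theorem compute_cascade_breadth_spec : Claim_equal_compute_cascade_breadth := by
  intro tree _
  unfold Spec_compute_cascade_breadth
  exact ports_agree tree
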